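-- pv_equiv track=rewrite | github.com/Loek21/Protein-Pow-d-er | code/algorithms/ehaplus.py | permutations_maker
-- ===== SOURCE A (Python) =====
-- import itertools
--
-- def permutations_maker(moves, piece_length):
--     """Makes all permutations for a chain and prunes some easy mistakes"""
--     permutations = [p for p in itertools.product(moves, repeat=piece_length)]
--     perms_pruned = []
--
--     # prune the permutation list
--     for moveset in permutations:
--         take_moves = True
--
--         # filter out back and forth moves
--         for move in range(len(moveset) - 1):
--             if moveset[move] == - moveset[move + 1]:
--                 take_moves = False
--                 break
--
--         # filter out too large straight moves
--         for move in range(len(moveset) - 3):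
--             if moveset[move] == moveset[move + 1] and moveset[move] == moveset[move + 2] and moveset[move] == moveset[move + 3]:
--                 take_moves = False
--                 break
--
--         # filter out circular moves
--         for move in range(len(moveset) - 3):
--             if moveset[move] == -moveset[move + 2] and moveset[move + 1] == -moveset[move + 3]:
--                 take_moves = False
--                 break
--
--         if take_moves == True:
--             perms_pruned.append(moveset)
--
--     return perms_pruned
-- ===== SOURCE B (Python) =====
-- def permutations_maker(moves, piece_length):
--     """Grow the sequences one position at a time, pruning invalid extensions immediately,
--     so tuples containing an invalid window are never generated at all."""
--     if piece_length < 0: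
--         raise ValueError("piece_length must be non-negative")
--
--     def ok(rev, m):
--         # may move m follow the prefix rev?
--         if rev and rev[-1] == -m:
--             return False
--         if len(rev) >= 3:
--             a, b, c = rev[-1], rev[-2], rev[-3]
--             if c == b and b == a and a == m:
--                 return False
--             if c == -a and b == -m:
--                 return False
--         return True
--
--     frontier = [()]
--     k = piece_length
--     while k > 0 and frontier:
--         frontier = [rev + (m,) for rev in frontier for m in moves if ok(rev, m)]
--         k -= 1
--     return frontier
-- ===== Notes on version B (the rewrite author's own statement) =====
-- stated objective: alternative
-- what changed: B replaces A's generate-all-|moves|^n-tuples-then-filter with layer-by-layer growth that extends only still-valid prefixes (checking just the window ending at the new move), so tuples containing an invalid window are never generated; since the pruned output can itself be exponentially large, no overall speed is claimed.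
import Mathlib
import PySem

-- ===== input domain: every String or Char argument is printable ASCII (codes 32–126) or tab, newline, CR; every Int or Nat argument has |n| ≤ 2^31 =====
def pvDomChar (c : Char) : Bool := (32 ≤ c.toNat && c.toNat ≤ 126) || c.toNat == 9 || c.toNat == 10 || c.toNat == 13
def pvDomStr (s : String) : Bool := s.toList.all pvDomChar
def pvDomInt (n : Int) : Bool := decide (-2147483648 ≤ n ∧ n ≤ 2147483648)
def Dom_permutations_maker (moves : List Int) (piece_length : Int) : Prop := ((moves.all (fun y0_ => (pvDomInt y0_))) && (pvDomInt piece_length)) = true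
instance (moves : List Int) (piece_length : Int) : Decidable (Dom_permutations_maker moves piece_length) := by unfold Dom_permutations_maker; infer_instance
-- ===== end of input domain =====

-- B replaces A's generate-all-then-filter by layer-by-layer growth that extends only
-- still-valid prefixes (alternative algorithm: sequences with an invalid window are never generated).


-- ===== PORT A =====
-- itertools.product(moves, repeat=n), in product order (last coordinate varies fastest)
def pyProduct (moves : List Int) : Nat → List (List Int)
  | 0 => [[]]
  | n + 1 => (pyProduct moves n).flatMap (fun s => moves.map (fun m => s ++ [m]))

-- "for move in range(len(moveset)-1): if moveset[move] == -moveset[move+1]"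
def hasBF : List Int → Bool
  | a :: b :: t => (a == -b) || hasBF (b :: t)
  | _ => false

-- "moveset[move] == moveset[move+1] and moveset[move] == moveset[move+2] and moveset[move] == moveset[move+3]"
def hasRun4 : List Int → Bool
  | a :: b :: c :: d :: t => (a == b && a == c && a == d) || hasRun4 (b :: c :: d :: t)
  | _ => false

-- "moveset[move] == -moveset[move+2] and moveset[move+1] == -moveset[move+3]"
def hasCirc : List Int → Bool
  | a :: b :: c :: d :: t => (a == -c && b == -d) || hasCirc (b :: c :: d :: t)
  | _ => false

def takeMoves (s : List Int) : Bool := !(hasBF s || hasRun4 s || hasCirc s)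

def permutations_maker (moves : List Int) (piece_length : Int) : List (List Int) :=
  (pyProduct moves piece_length.toNat).filter takeMoves

-- ===== PORT B =====
-- ok(rev, m): may move m follow the prefix rev?  (rev[-1], rev[-2], rev[-3] are read
-- off the reversed list: exact for Python's negative indexing on a non-empty prefix)
def extOkR (r : List Int) (m : Int) : Bool :=
  match r with
  | [] => true
  | [a] => !(a == -m)
  | [a, _] => !(a == -m)
  | a :: b :: c :: _ =>
      if a == -m then false
      else if c == b && b == a && a == m then false
      else if c == -a && b == -m then false
      else true

def extOk (rev : List Int) (m : Int) : Bool := extOkR rev.reverse m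

-- "[rev + (m,) for rev in frontier for m in moves if ok(rev, m)]"
def layerB (moves : List Int) (frontier : List (List Int)) : List (List Int) :=
  frontier.flatMap (fun rev => moves.flatMap (fun m => if extOk rev m then [rev ++ [m]] else []))

-- "while k > 0 and frontier: frontier = …; k -= 1"
def growB (moves : List Int) : Nat → List (List Int) → List (List Int)
  | 0, fr => fr
  | k + 1, fr => if fr = [] then fr else growB moves k (layerB moves fr)

def permutations_maker_alt (moves : List Int) (piece_length : Int) : List (List Int) :=
  growB moves piece_length.toNat [[]]

-- ===== PRECONDITION & SPEC =====
-- Pre_ excludes piece_length < 0, on which Python A raises ValueError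
-- (itertools.product's repeat must be non-negative); B raises there too.
def Pre_permutations_maker (moves : List Int) (piece_length : Int) : Prop := 0 ≤ piece_length
instance (moves : List Int) (piece_length : Int) : Decidable (Pre_permutations_maker moves piece_length) := by unfold Pre_permutations_maker; infer_instance
def pvWitness_permutations_maker : List Int × Int := ([1, -1, 2], 3)

def Spec_permutations_maker (moves : List Int) (piece_length : Int) (out : List (List Int)) : Prop := out = permutations_maker_alt moves piece_length
instance (moves : List Int) (piece_length : Int) (out : List (List Int)) : Decidable (Spec_permutations_maker moves piece_length out) := by unfold Spec_permutations_maker; infer_instance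

-- ===== CLAIM (what is proved, stated in full; the proofs are below) =====
def Claim_equal_permutations_maker : Prop := ∀ (moves : List Int) (piece_length : Int), Dom_permutations_maker moves piece_length → Pre_permutations_maker moves piece_length → Spec_permutations_maker moves piece_length (permutations_maker moves piece_length)

-- ===== LEMMAS AND PROOFS =====

-- the window created at the end when m is appended after the prefix whose reverse is the argument
def win2 : List Int → Int → Bool
  | a :: _, m => a == -m
  | _, _ => false

def win4r : List Int → Int → Bool
  | a :: b :: c :: _, m => c == b && c == a && c == m
  | _, _ => false

def win4c : List Int → Int → Bool
  | a :: b :: c :: _, m => c == -a && b == -m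
  | _, _ => false

lemma win2_append (l : List Int) (x m : Int) (h : l ≠ []) : win2 (l ++ [x]) m = win2 l m := by
  cases l with
  | nil => exact absurd rfl h
  | cons a t => rfl

lemma exists_three (l : List Int) (h : 3 ≤ l.length) : ∃ u v w r, l = u :: v :: w :: r := by
  match l, h with
  | u :: v :: w :: r, _ => exact ⟨u, v, w, r, rfl⟩

lemma win4r_append (l : List Int) (x m : Int) (h : 3 ≤ l.length) : win4r (l ++ [x]) m = win4r l m := by
  obtain ⟨u, v, w, r, rfl⟩ := exists_three l h; rfl

lemma win4c_append (l : List Int) (x m : Int) (h : 3 ≤ l.length) : win4c (l ++ [x]) m = win4c l m := by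
  obtain ⟨u, v, w, r, rfl⟩ := exists_three l h; rfl

lemma hasBF_snoc : ∀ (p : List Int) (m : Int), hasBF (p ++ [m]) = (hasBF p || win2 p.reverse m)
  | [], m => rfl
  | [a], m => by simp [hasBF, win2]
  | a :: b :: t, m => by
    show ((a == -b) || hasBF ((b :: t) ++ [m])) = (hasBF (a :: b :: t) || win2 (a :: b :: t).reverse m)
    rw [hasBF_snoc (b :: t) m]
    have hw : win2 ((a :: b :: t).reverse) m = win2 ((b :: t).reverse) m := by
      rw [List.reverse_cons]
      exact win2_append _ _ _ (by simp)
    rw [hw]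
    simp [hasBF, Bool.or_assoc]

lemma hasRun4_snoc : ∀ (p : List Int) (m : Int), hasRun4 (p ++ [m]) = (hasRun4 p || win4r p.reverse m)
  | [], m => rfl
  | [a], m => rfl
  | [a, b], m => rfl
  | [a, b, c], m => by simp [hasRun4, win4r]
  | a :: b :: c :: d :: t, m => by
    show ((a == b && a == c && a == d) || hasRun4 ((b :: c :: d :: t) ++ [m]))
        = (hasRun4 (a :: b :: c :: d :: t) || win4r (a :: b :: c :: d :: t).reverse m)
    rw [hasRun4_snoc (b :: c :: d :: t) m]
    have hw : win4r ((a :: b :: c :: d :: t).reverse) m = win4r ((b :: c :: d :: t).reverse) m := by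
      rw [List.reverse_cons]
      exact win4r_append _ _ _ (by simp)
    rw [hw]
    simp [hasRun4, Bool.or_assoc]

lemma hasCirc_snoc : ∀ (p : List Int) (m : Int), hasCirc (p ++ [m]) = (hasCirc p || win4c p.reverse m)
  | [], m => rfl
  | [a], m => rfl
  | [a, b], m => rfl
  | [a, b, c], m => by simp [hasCirc, win4c]
  | a :: b :: c :: d :: t, m => by
    show ((a == -c && b == -d) || hasCirc ((b :: c :: d :: t) ++ [m]))
        = (hasCirc (a :: b :: c :: d :: t) || win4c (a :: b :: c :: d :: t).reverse m)
    rw [hasCirc_snoc (b :: c :: d :: t) m]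
    have hw : win4c ((a :: b :: c :: d :: t).reverse) m = win4c ((b :: c :: d :: t).reverse) m := by
      rw [List.reverse_cons]
      exact win4c_append _ _ _ (by simp)
    rw [hw]
    simp [hasCirc, Bool.or_assoc]

lemma chain_eq (a b c m : Int) : (c == b && b == a && a == m) = (c == b && c == a && c == m) := by
  rw [Bool.eq_iff_iff]
  simp only [Bool.and_eq_true, beq_iff_eq]
  omega

lemma extOkR_char (r : List Int) (m : Int) :
    extOkR r m = !(win2 r m || win4r r m || win4c r m) := by
  match r with
  | [] => rfl
  | [a] => simp [extOkR, win2, win4r, win4c]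
  | [a, b] => simp [extOkR, win2, win4r, win4c]
  | a :: b :: c :: t =>
    show (if a == -m then false
          else if c == b && b == a && a == m then false
          else if c == -a && b == -m then false
          else true) = !(win2 (a :: b :: c :: t) m || win4r (a :: b :: c :: t) m || win4c (a :: b :: c :: t) m)
    rw [chain_eq a b c m]
    show _ = !((a == -m) || (c == b && c == a && c == m) || (c == -a && b == -m))
    cases h1 : (a == -m) <;> cases h2 : (c == b && c == a && c == m) <;>
      cases h3 : (c == -a && b == -m) <;> simp

-- appending m keeps a sequence valid iff the sequence was valid and the new last window is
lemma takeMoves_snoc (p : List Int) (m : Int) :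
    takeMoves (p ++ [m]) = (takeMoves p && extOk p m) := by
  simp only [takeMoves, extOk, hasBF_snoc, hasRun4_snoc, hasCirc_snoc, extOkR_char]
  cases hasBF p <;> cases hasRun4 p <;> cases hasCirc p <;>
    cases win2 p.reverse m <;> cases win4r p.reverse m <;> cases win4c p.reverse m <;> rfl

lemma row_true (s : List Int) (h : takeMoves s = true) :
    ∀ (ms : List Int), (ms.map (fun m => s ++ [m])).filter takeMoves
      = ms.flatMap (fun m => if extOk s m then [s ++ [m]] else [])
  | [] => rfl
  | m :: ms => by
    rw [List.map_cons, List.filter_cons, List.flatMap_cons, takeMoves_snoc, h, row_true s h ms]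
    cases hx : extOk s m <;> simp

lemma row_false (s : List Int) (h : takeMoves s = false) (ms : List Int) :
    (ms.map (fun m => s ++ [m])).filter takeMoves = [] := by
  rw [List.filter_eq_nil_iff]
  intro x hx
  obtain ⟨m, _, rfl⟩ := List.mem_map.mp hx
  rw [takeMoves_snoc, h]
  simp

lemma flatMap_filter_if (g : List Int → List (List Int)) :
    ∀ (l : List (List Int)), (l.filter takeMoves).flatMap g
      = l.flatMap (fun s => if takeMoves s = true then g s else [])
  | [] => rfl
  | s :: t => by
    cases h : takeMoves s <;>
      simp [h, flatMap_filter_if g t]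

lemma layer_eq (moves : List Int) (j : Nat) :
    layerB moves ((pyProduct moves j).filter takeMoves) = (pyProduct moves (j + 1)).filter takeMoves := by
  have hP : pyProduct moves (j + 1) = (pyProduct moves j).flatMap (fun s => moves.map (fun m => s ++ [m])) := rfl
  rw [hP, List.filter_flatMap]
  unfold layerB
  rw [flatMap_filter_if]
  apply List.flatMap_congr
  intro s _
  cases h : takeMoves s with
  | true => rw [row_true s h moves]; simp
  | false => rw [row_false s h moves]; simp

lemma filter_empty_stable (moves : List Int) :
    ∀ (k j : Nat), (pyProduct moves j).filter takeMoves = [] →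
      (pyProduct moves (j + k)).filter takeMoves = []
  | 0, j, h => h
  | k + 1, j, h => by
    have h1 : (pyProduct moves (j + 1)).filter takeMoves = [] := by
      rw [← layer_eq moves j, h]; rfl
    have := filter_empty_stable moves k (j + 1) h1
    rwa [show j + 1 + k = j + (k + 1) by omega] at this

lemma growB_eq (moves : List Int) :
    ∀ (k j : Nat), growB moves k ((pyProduct moves j).filter takeMoves)
      = (pyProduct moves (j + k)).filter takeMoves
  | 0, j => by simp [growB]
  | k + 1, j => by
    show (if (pyProduct moves j).filter takeMoves = [] then (pyProduct moves j).filter takeMoves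
          else growB moves k (layerB moves ((pyProduct moves j).filter takeMoves)))
        = (pyProduct moves (j + (k + 1))).filter takeMoves
    by_cases h : (pyProduct moves j).filter takeMoves = []
    · rw [if_pos h, h, filter_empty_stable moves (k + 1) j h]
    · rw [if_neg h, layer_eq moves j, growB_eq moves k (j + 1),
        show j + 1 + k = j + (k + 1) by omega]

-- ===== VERDICT (by name: the statement is the Claim_ definition above) =====
theorem permutations_maker_spec : Claim_equal_permutations_maker := by
  intro moves piece_length _ _
  show permutations_maker moves piece_length = permutations_maker_alt moves piece_length
  unfold permutations_maker permutations_maker_alt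
  have h0 : ([[]] : List (List Int)) = ([[]] : List (List Int)).filter takeMoves := rfl
  rw [h0]
  have := growB_eq moves piece_length.toNat 0
  simpa using this.symm
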